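-- pv_equiv track=rewrite | github.com/zknbnbdnb/leetcode | 34.在排序数组中查找元素的第一个和最后一个位置.py | searchLastEqualElement
-- ===== SOURCE A (Python) =====
-- def searchLastEqualElement(nums, target):
--     start, end = 0, len(nums) - 1
--     while start <= end:
--         mid = start + (end - start) // 2
--         if nums[mid] < target:
--             start = mid+1
--         elif nums[mid] > target:
--             end = mid - 1
--         else:
--             if mid == len(nums) - 1 or nums[mid+1] != target:
--                 return mid
--             start = mid + 1
--     return -1
-- ===== SOURCE B (Python) =====
-- def searchLastEqualElement(nums, target):
--     for i in range(len(nums) - 1, -1, -1):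
--         if nums[i] == target:
--             return i
--     return -1
-- ===== Notes on version B (the rewrite author's own statement) =====
-- stated objective: simpler
-- what changed: Replaces A's binary search (with its nums[mid+1] neighbor probe and mid==len-1 special case) by a single backward linear scan that returns the first index from the right whose element equals target.
-- outside the precondition, e.g. on searchLastEqualElement([0, 1, 0, 1], 1): A returns 1, B returns 3
import Mathlib
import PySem

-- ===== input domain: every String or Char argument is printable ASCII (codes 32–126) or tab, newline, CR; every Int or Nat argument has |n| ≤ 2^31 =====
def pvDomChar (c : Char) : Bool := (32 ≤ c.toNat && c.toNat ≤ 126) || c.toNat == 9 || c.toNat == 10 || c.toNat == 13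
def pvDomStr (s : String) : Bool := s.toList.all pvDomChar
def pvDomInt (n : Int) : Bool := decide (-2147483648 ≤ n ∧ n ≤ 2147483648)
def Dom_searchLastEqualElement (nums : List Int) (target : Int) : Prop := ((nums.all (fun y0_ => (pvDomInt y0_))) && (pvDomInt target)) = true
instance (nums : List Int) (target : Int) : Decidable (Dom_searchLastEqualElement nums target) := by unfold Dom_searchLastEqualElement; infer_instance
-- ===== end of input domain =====

-- B replaces A's binary search (nums[mid+1] neighbor probe, mid == len-1 special case)
-- by a single backward linear scan: first index from the right whose element equals
-- target, else -1. Objective: simpler (B is not faster; it is O(n) vs A's O(log n)).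

-- ===== PORT A =====
-- indices mid and mid+1 are always in range when the loop is entered with
-- 0 ≤ start, end_ ≤ len-1 (mid+1 is read only when mid ≠ len-1), so pyGetD is exact here
-- fuel = a bound on the remaining loop iterations, only to make the while-loop a
-- structural recursion; it is never exhausted (fuel ≥ end-start+1 throughout)
def searchLoopA (nums : List Int) (target : Int) : Nat → Int → Int → Int
  | 0, _, _ => -1
  | fuel + 1, start, end_ =>
    if start ≤ end_ then
      let mid := start + PySem.Int.floordiv (end_ - start) 2
      if PySem.List.pyGetD nums mid 0 < target then
        searchLoopA nums target fuel (mid + 1) end_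
      else if target < PySem.List.pyGetD nums mid 0 then
        searchLoopA nums target fuel start (mid - 1)
      else if mid = (nums.length : Int) - 1 ∨ PySem.List.pyGetD nums (mid + 1) 0 ≠ target then
        mid
      else
        searchLoopA nums target fuel (mid + 1) end_
    else
      -1

def searchLastEqualElement (nums : List Int) (target : Int) : Int :=
  searchLoopA nums target (nums.length + 1) 0 ((nums.length : Int) - 1)

-- ===== PORT B =====
-- B's 'for i in range(len(nums)-1, -1, -1)' loop, transcribed as recursion on the
-- number k of indices still to visit (the next index visited is k-1); the index read
-- is always in range, so pyGetD is exact here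
def scanBackB (nums : List Int) (target : Int) : Nat → Int
  | 0 => -1
  | k + 1 =>
    if PySem.List.pyGetD nums (k : Int) 0 = target then (k : Int)
    else scanBackB nums target k

def searchLastEqualElement_alt (nums : List Int) (target : Int) : Int :=
  scanBackB nums target nums.length

-- ===== PRECONDITION & SPEC =====
-- Pre_ excludes unsorted lists that contain the target: the function is a binary search over a
-- sorted array, and on such input both programs' return values are accidents of their probe
-- sequences (A may return an earlier occurrence or -1, B the true last occurrence), so neither
-- value is the specifiable one; when the target is absent both return -1, so those inputs stay in.
def Pre_searchLastEqualElement (nums : List Int) (target : Int) : Prop :=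
  List.Pairwise (· ≤ ·) nums ∨ target ∉ nums

instance (nums : List Int) (target : Int) : Decidable (Pre_searchLastEqualElement nums target) := by
  unfold Pre_searchLastEqualElement; infer_instance

def pvWitness_searchLastEqualElement : List Int × Int := ([1, 2, 2, 3], 2)

def Spec_searchLastEqualElement (nums : List Int) (target : Int) (out : Int) : Prop := out = searchLastEqualElement_alt nums target
instance (nums : List Int) (target : Int) (out : Int) : Decidable (Spec_searchLastEqualElement nums target out) := by unfold Spec_searchLastEqualElement; infer_instance

-- ===== CLAIM (what is proved, stated in full; the proofs are below) =====
def Claim_equal_searchLastEqualElement : Prop := ∀ (nums : List Int) (target : Int), Dom_searchLastEqualElement nums target → Pre_searchLastEqualElement nums target → Spec_searchLastEqualElement nums target (searchLastEqualElement nums target)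

-- ===== LEMMAS AND PROOFS =====

-- element at an Int index (callers keep the index in range)
def gI (nums : List Int) (i : Int) : Int := nums.getD i.toNat 0

-- index of the last occurrence of t in nums, -1 if none (proof-side characterisation)
def lastOcc (nums : List Int) (t : Int) : Int :=
  (List.range nums.length).foldl (fun acc i => if nums.getD i 0 = t then (i : Int) else acc) (-1)

theorem gI_pyGetD (nums : List Int) (i : Int) (h0 : 0 ≤ i) :
    PySem.List.pyGetD nums i 0 = gI nums i := by
  unfold gI
  exact PySem.List.pyGetD_of_nonneg nums 0 h0

theorem sorted_gI {nums : List Int} (hs : List.Pairwise (· ≤ ·) nums)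
    {i j : Int} (h0 : 0 ≤ i) (hij : i ≤ j) (hj : j < nums.length) :
    gI nums i ≤ gI nums j := by
  unfold gI
  rcases eq_or_lt_of_le hij with rfl | hlt
  · exact le_refl _
  · have hi : i.toNat < j.toNat := by omega
    have hjn : j.toNat < nums.length := by omega
    rw [List.getD_eq_getElem?_getD, List.getD_eq_getElem?_getD,
        List.getElem?_eq_getElem (by omega), List.getElem?_eq_getElem hjn]
    exact (List.pairwise_iff_getElem.mp hs) i.toNat j.toNat (by omega) hjn hi

theorem lastOcc_aux (nums : List Int) (t : Int) (k : Nat) :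
    (-1 ≤ (List.range k).foldl (fun acc i => if nums.getD i 0 = t then (i : Int) else acc) (-1) ∧
      (List.range k).foldl (fun acc i => if nums.getD i 0 = t then (i : Int) else acc) (-1) < (k : Int)) ∧
    (∀ i : Nat, i < k → nums.getD i 0 = t →
      (i : Int) ≤ (List.range k).foldl (fun acc i => if nums.getD i 0 = t then (i : Int) else acc) (-1)) ∧
    (0 ≤ (List.range k).foldl (fun acc i => if nums.getD i 0 = t then (i : Int) else acc) (-1) →
      nums.getD ((List.range k).foldl (fun acc i => if nums.getD i 0 = t then (i : Int) else acc) (-1)).toNat 0 = t) := by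
  induction k with
  | zero => simp
  | succ k ih =>
    rw [List.range_succ, List.foldl_append]
    simp only [List.foldl_cons, List.foldl_nil]
    obtain ⟨⟨hlb, hub⟩, hmax, hval⟩ := ih
    by_cases hk : nums.getD k 0 = t
    · rw [if_pos hk]
      refine ⟨⟨by omega, by omega⟩, ?_, ?_⟩
      · intro i hi _; omega
      · intro _; simpa using hk
    · rw [if_neg hk]
      refine ⟨⟨hlb, by omega⟩, ?_, hval⟩
      intro i hi hit
      have : i ≠ k := fun h => hk (h ▸ hit)
      exact hmax i (by omega) hit

theorem lastOcc_facts (nums : List Int) (t : Int) :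
    (-1 ≤ lastOcc nums t ∧ lastOcc nums t < (nums.length : Int)) ∧
    (∀ i : Int, 0 ≤ i → i < (nums.length : Int) → gI nums i = t → i ≤ lastOcc nums t) ∧
    (0 ≤ lastOcc nums t → gI nums (lastOcc nums t) = t) := by
  unfold lastOcc gI
  obtain ⟨hb, hmax, hval⟩ := lastOcc_aux nums t nums.length
  refine ⟨hb, ?_, hval⟩
  intro i h0 h1 hit
  have := hmax i.toNat (by omega) hit
  omega

theorem gI_mem (nums : List Int) (i : Int) (h0 : 0 ≤ i) (h1 : i < (nums.length : Int)) :
    gI nums i ∈ nums := by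
  unfold gI
  rw [List.getD_eq_getElem?_getD, List.getElem?_eq_getElem (by omega)]
  exact List.getElem_mem _

-- A's loop computes lastOcc on sorted input containing possible occurrences in [start,end]
theorem loopA_eq (nums : List Int) (t : Int) (hs : List.Pairwise (· ≤ ·) nums) :
    ∀ N : Nat, ∀ start end_ : Int, (end_ + 1 - start).toNat ≤ N →
      0 ≤ start → end_ < (nums.length : Int) →
      (lastOcc nums t = -1 ∨ (start ≤ lastOcc nums t ∧ lastOcc nums t ≤ end_)) →
      searchLoopA nums t N start end_ = lastOcc nums t := by
  obtain ⟨⟨hLlb, hLub⟩, hmax, hval⟩ := lastOcc_facts nums t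
  intro N
  induction N with
  | zero =>
    intro start end_ hN h0 _ hinv
    simp only [searchLoopA]
    omega
  | succ N ih =>
    intro start end_ hN h0 hend hinv
    simp only [searchLoopA]
    by_cases hle : start ≤ end_
    · rw [if_pos hle]
      have hfd : PySem.Int.floordiv (end_ - start) 2 = (end_ - start) / 2 :=
        PySem.Int.floordiv_eq_ediv_of_pos (by omega)
      set mid := start + PySem.Int.floordiv (end_ - start) 2 with hmid
      have hmb : start ≤ mid ∧ mid ≤ end_ := by rw [hmid, hfd]; omega
      have hg : PySem.List.pyGetD nums mid 0 = gI nums mid :=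
        gI_pyGetD nums mid (by omega)
      by_cases hlt : PySem.List.pyGetD nums mid 0 < t
      · rw [if_pos hlt]
        refine ih (mid + 1) end_ (by omega) (by omega) hend ?_
        rcases hinv with h | ⟨h1, h2⟩
        · exact Or.inl h
        · right
          refine ⟨?_, h2⟩
          by_contra hc
          have : gI nums (lastOcc nums t) ≤ gI nums mid :=
            sorted_gI hs (by omega) (by omega) (by omega)
          have := hval (by omega)
          rw [hg] at hlt; omega
      · rw [if_neg hlt]
        by_cases hgt : t < PySem.List.pyGetD nums mid 0
        · rw [if_pos hgt]
          refine ih start (mid - 1) (by omega) h0 (by omega) ?_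
          rcases hinv with h | ⟨h1, h2⟩
          · exact Or.inl h
          · right
            refine ⟨h1, ?_⟩
            by_contra hc
            have : gI nums mid ≤ gI nums (lastOcc nums t) :=
              sorted_gI hs (by omega) (by omega) (by omega)
            have := hval (by omega)
            rw [hg] at hgt; omega
        · rw [if_neg hgt]
          have heq : gI nums mid = t := by rw [hg] at hlt hgt; omega
          have hLmid : mid ≤ lastOcc nums t := hmax mid (by omega) (by omega) heq
          by_cases hret : mid = (nums.length : Int) - 1 ∨ PySem.List.pyGetD nums (mid + 1) 0 ≠ t
          · rw [if_pos hret]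
            rcases hret with h | h
            · omega
            · by_contra hc
              have hmid1 : mid + 1 < (nums.length : Int) := by
                by_contra hc2
                have : lastOcc nums t ≤ mid := by omega
                omega
              have h1 : gI nums mid ≤ gI nums (mid + 1) :=
                sorted_gI hs (by omega) (by omega) (by omega)
              have h2 : gI nums (mid + 1) ≤ gI nums (lastOcc nums t) :=
                sorted_gI hs (by omega) (by omega) (by omega)
              have := hval (by omega)
              rw [gI_pyGetD nums (mid + 1) (by omega)] at h
              omega
          · rw [if_neg hret]
            push Not at hret
            obtain ⟨hne, heq1⟩ := hret
            refine ih (mid + 1) end_ (by omega) (by omega) hend ?_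
            right
            have hmid1 : mid + 1 < (nums.length : Int) := by omega
            rw [gI_pyGetD nums (mid + 1) (by omega)] at heq1
            have := hmax (mid + 1) (by omega) hmid1 heq1
            refine ⟨by omega, ?_⟩
            rcases hinv with h | ⟨_, h2⟩
            · omega
            · exact h2
    · rw [if_neg hle]
      omega

theorem loopA_notmem (nums : List Int) (t : Int) (hmem : t ∉ nums) :
    ∀ N : Nat, ∀ start end_ : Int, 0 ≤ start → end_ < (nums.length : Int) →
      searchLoopA nums t N start end_ = -1 := by
  intro N
  induction N with
  | zero => intro start end_ _ _; simp only [searchLoopA]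
  | succ N ih =>
    intro start end_ h0 hend
    simp only [searchLoopA]
    by_cases hle : start ≤ end_
    · rw [if_pos hle]
      have hfd : PySem.Int.floordiv (end_ - start) 2 = (end_ - start) / 2 :=
        PySem.Int.floordiv_eq_ediv_of_pos (by omega)
      set mid := start + PySem.Int.floordiv (end_ - start) 2 with hmid
      have hmb : start ≤ mid ∧ mid ≤ end_ := by rw [hmid, hfd]; omega
      have hg : PySem.List.pyGetD nums mid 0 = gI nums mid :=
        gI_pyGetD nums mid (by omega)
      have hne : PySem.List.pyGetD nums mid 0 ≠ t := by
        rw [hg]; intro hc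
        exact hmem (hc ▸ gI_mem nums mid (by omega) (by omega))
      by_cases hlt : PySem.List.pyGetD nums mid 0 < t
      · rw [if_pos hlt]; exact ih (mid + 1) end_ (by omega) hend
      · rw [if_neg hlt]
        rw [if_pos (by omega)]
        exact ih start (mid - 1) h0 (by omega)
    · rw [if_neg hle]

-- B's backward scan over the first k indices computes exactly lastOcc's foldl over range k
theorem scanBackB_eq_foldl (nums : List Int) (t : Int) :
    ∀ k : Nat,
      scanBackB nums t k =
        (List.range k).foldl (fun acc i => if nums.getD i 0 = t then (i : Int) else acc) (-1) := by
  intro k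
  induction k with
  | zero => simp [scanBackB]
  | succ k ih =>
    rw [List.range_succ, List.foldl_append]
    simp only [List.foldl_cons, List.foldl_nil, scanBackB]
    rw [gI_pyGetD nums (k : Int) (by omega)]
    unfold gI
    simp only [Int.toNat_natCast]
    by_cases hk : nums.getD k 0 = t
    · rw [if_pos hk, if_pos hk]
    · rw [if_neg hk, if_neg hk, ih]

theorem alt_eq_lastOcc (nums : List Int) (t : Int) :
    searchLastEqualElement_alt nums t = lastOcc nums t := by
  unfold searchLastEqualElement_alt lastOcc
  exact scanBackB_eq_foldl nums t nums.length

theorem lastOcc_notmem (nums : List Int) (t : Int) (hmem : t ∉ nums) :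
    lastOcc nums t = -1 := by
  obtain ⟨⟨hLlb, hLub⟩, _, hval⟩ := lastOcc_facts nums t
  by_contra hc
  have h0 : 0 ≤ lastOcc nums t := by omega
  exact hmem (hval h0 ▸ gI_mem nums (lastOcc nums t) h0 hLub)

-- ===== VERDICT (by name: the statement is the Claim_ definition above) =====
theorem searchLastEqualElement_spec : Claim_equal_searchLastEqualElement := by
  intro nums target _ hpre
  unfold Spec_searchLastEqualElement searchLastEqualElement
  rw [alt_eq_lastOcc]
  rcases hpre with hs | hmem
  · obtain ⟨⟨hLlb, hLub⟩, _, _⟩ := lastOcc_facts nums target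
    exact loopA_eq nums target hs (nums.length + 1) 0 ((nums.length : Int) - 1)
      (by omega) (le_refl _) (by omega) (by omega)
  · rw [loopA_notmem nums target hmem (nums.length + 1) 0 ((nums.length : Int) - 1)
        (le_refl _) (by omega), lastOcc_notmem nums target hmem]
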